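-- pv_equiv track=rewrite | github.com/ford-at-home/prompt2production | core/chains/segment_visualizer.py | optimize_visual_transitions
-- ===== SOURCE A (Python) =====
-- from typing import List, Dict
--
-- def optimize_visual_transitions(visual_segments: List[Dict]) -> List[Dict]:
--     """Add transition hints to ensure smooth visual flow."""
--
--     for i, seg in enumerate(visual_segments):
--         if i > 0:
--             # Add transition from previous
--             seg['transition_in'] = 'smooth cut'
--
--         if i < len(visual_segments) - 1:
--             # Add transition to next
--             seg['transition_out'] = 'smooth cut'
--
--         # First and last segments get special treatment
--         if i == 0:
--             seg['visual_prompt'] += " Start with an establishing shot."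
--         elif i == len(visual_segments) - 1:
--             seg['visual_prompt'] += " End with a concluding visual that summarizes the concept."
--
--     return visual_segments
-- ===== SOURCE B (Python) =====
-- def optimize_visual_transitions(visual_segments):
--     """Add transition hints to ensure smooth visual flow."""
--     # Region-staged rewrite: split the list into first / interior / last and
--     # give each region its uniform treatment, with no per-element position tests.
--     if not visual_segments:
--         return visual_segments
--     if len(visual_segments) > 1:
--         visual_segments[0]['transition_out'] = 'smooth cut'
--         for seg in visual_segments[1:-1]:
--             seg['transition_in'] = 'smooth cut'
--             seg['transition_out'] = 'smooth cut'
--         last = visual_segments[-1]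
--         last['transition_in'] = 'smooth cut'
--         last['visual_prompt'] += " End with a concluding visual that summarizes the concept."
--     visual_segments[0]['visual_prompt'] += " Start with an establishing shot."
--     return visual_segments
-- ===== Notes on version B (the rewrite author's own statement) =====
-- stated objective: alternative
-- what changed: Replaces A's single indexed loop that tests every element's position three times by a region decomposition: the first and last segments are edited directly and one unconditional loop stamps both transitions on the interior slice, so no positional conditionals run per element.
import Mathlib
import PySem

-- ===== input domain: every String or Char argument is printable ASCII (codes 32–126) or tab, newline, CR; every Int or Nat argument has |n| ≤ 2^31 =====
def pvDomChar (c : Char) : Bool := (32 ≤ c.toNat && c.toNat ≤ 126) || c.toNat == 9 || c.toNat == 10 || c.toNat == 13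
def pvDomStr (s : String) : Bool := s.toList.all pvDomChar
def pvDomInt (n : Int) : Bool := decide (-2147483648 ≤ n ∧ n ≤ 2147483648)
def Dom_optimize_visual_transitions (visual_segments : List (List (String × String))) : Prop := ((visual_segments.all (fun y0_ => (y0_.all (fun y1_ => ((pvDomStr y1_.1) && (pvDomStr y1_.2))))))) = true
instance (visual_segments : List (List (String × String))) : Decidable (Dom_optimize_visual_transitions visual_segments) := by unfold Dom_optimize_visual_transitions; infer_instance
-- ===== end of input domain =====

-- B replaces A's indexed loop (three positional tests per element) by a region decomposition:
-- first and last segments are edited directly and one unconditional loop stamps both transitions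
-- on the interior slice; equivalence is about the return value only (both Python versions mutate
-- the input dicts in place in the same way).


-- ===== PORT A =====
-- loop body for index i (n = len(visual_segments)): the three guarded dict mutations of A
def pvAStep (n i : Int) (seg : List (String × String)) : List (String × String) :=
  let d := PySem.Dict.mk seg
  let d := if 0 < i then d.insert "transition_in" "smooth cut" else d
  let d := if i < n - 1 then d.insert "transition_out" "smooth cut" else d
  let d := if i = 0 then d.modify "visual_prompt" "" (· ++ " Start with an establishing shot.")
           else if i = n - 1 then d.modify "visual_prompt" "" (· ++ " End with a concluding visual that summarizes the concept.")
           else d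
  d.items

def optimize_visual_transitions (visual_segments : List (List (String × String))) : List (List (String × String)) :=
  (PySem.List.enumerate visual_segments).map
    (fun p => pvAStep (PySem.List.len visual_segments) p.1 p.2)

-- ===== PORT B =====
def pvTransIn (seg : List (String × String)) : List (String × String) :=
  ((PySem.Dict.mk seg).insert "transition_in" "smooth cut").items

def pvTransOut (seg : List (String × String)) : List (String × String) :=
  ((PySem.Dict.mk seg).insert "transition_out" "smooth cut").items

def pvAddStart (seg : List (String × String)) : List (String × String) :=
  ((PySem.Dict.mk seg).modify "visual_prompt" "" (· ++ " Start with an establishing shot.")).items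

def pvAddEnd (seg : List (String × String)) : List (String × String) :=
  ((PySem.Dict.mk seg).modify "visual_prompt" "" (· ++ " End with a concluding visual that summarizes the concept.")).items

-- region decomposition: empty / singleton / first :: interior ++ [last]
def optimize_visual_transitions_alt (visual_segments : List (List (String × String))) : List (List (String × String)) :=
  match visual_segments with
  | [] => []
  | [s] => [pvAddStart s]
  | s :: t :: r =>
      let interior := (t :: r).dropLast.map (fun seg => pvTransOut (pvTransIn seg))
      let lastSeg := pvAddEnd (pvTransIn ((t :: r).getLast (List.cons_ne_nil _ _)))
      pvAddStart (pvTransOut s) :: (interior ++ [lastSeg])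

-- ===== PRECONDITION & SPEC =====
def pvHasVP (seg : List (String × String)) : Bool := seg.any (fun p => p.1 == "visual_prompt")

-- A raises KeyError ('+=' on a missing 'visual_prompt') when the first segment (and, for
-- length > 1, the last segment) has no 'visual_prompt' key; exactly those inputs are excluded
-- (B raises there too).
def Pre_optimize_visual_transitions (visual_segments : List (List (String × String))) : Prop :=
  (visual_segments.head?.all pvHasVP && visual_segments.getLast?.all pvHasVP) = true
instance (visual_segments : List (List (String × String))) : Decidable (Pre_optimize_visual_transitions visual_segments) := by unfold Pre_optimize_visual_transitions; infer_instance

def pvWitness_optimize_visual_transitions : (List (List (String × String))) :=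
  [[("visual_prompt", "a city at dawn")], [("visual_prompt", "a closing shot"), ("mood", "calm")]]

def Spec_optimize_visual_transitions (visual_segments : List (List (String × String))) (out : List (List (String × String))) : Prop := out = optimize_visual_transitions_alt visual_segments
instance (visual_segments : List (List (String × String))) (out : List (List (String × String))) : Decidable (Spec_optimize_visual_transitions visual_segments out) := by unfold Spec_optimize_visual_transitions; infer_instance

-- ===== CLAIM (what is proved, stated in full; the proofs are below) =====
def Claim_equal_optimize_visual_transitions : Prop := ∀ (visual_segments : List (List (String × String))), Dom_optimize_visual_transitions visual_segments → Pre_optimize_visual_transitions visual_segments → Spec_optimize_visual_transitions visual_segments (optimize_visual_transitions visual_segments)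

-- ===== LEMMAS AND PROOFS =====

-- normal form of the tail (every element after the first) of A's result
def pvTailT : List (List (String × String)) → List (List (String × String))
  | [] => []
  | [b] => [pvAddEnd (pvTransIn b)]
  | b :: t :: rest => pvTransOut (pvTransIn b) :: pvTailT (t :: rest)

theorem lemA (t : List (List (String × String))) :
    ∀ i : Int, 1 ≤ i → t ≠ [] →
      (PySem.List.enumerate t i).map (fun p => pvAStep (i + t.length) p.1 p.2) = pvTailT t := by
  induction t with
  | nil => intro i _ h; exact absurd rfl h
  | cons b rest ih =>
    intro i hi _
    rw [PySem.List.enumerate_cons, List.map_cons]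
    match rest with
    | [] =>
      simp only [PySem.List.enumerate_nil, List.map_nil, List.length_cons, List.length_nil,
        pvTailT]
      simp only [pvAStep, pvAddEnd, pvTransIn]
      split_ifs <;> first | rfl | (exfalso; omega)
    | c :: r =>
      have hL : (((b :: c :: r) : List (List (String × String))).length : Int)
          = ((c :: r).length : Int) + 1 := by push_cast [List.length_cons]; ring
      rw [hL]
      refine congrArg₂ List.cons ?_ ?_
      · simp only [pvAStep, pvTransIn, pvTransOut]
        have hlen : (0:Int) < ((c :: r).length : Int) := by exact_mod_cast List.length_pos_of_ne_nil (by simp)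
        split_ifs <;> first | rfl | (exfalso; omega)
      · rw [show i + (((c :: r).length : Int) + 1) = (i + 1) + ((c :: r).length : Int) from by ring]
        rw [ih (i + 1) (by omega) (by simp)]

-- B's tail (interior map ++ last) is the same normal form
theorem lemB (t : List (List (String × String))) (h : t ≠ []) :
    t.dropLast.map (fun seg => pvTransOut (pvTransIn seg)) ++ [pvAddEnd (pvTransIn (t.getLast h))]
      = pvTailT t := by
  match t with
  | [b] => simp [pvTailT]
  | b :: c :: r =>
    simp only [pvTailT, List.dropLast_cons₂, List.map_cons, List.cons_append,
      List.getLast_cons (List.cons_ne_nil c r)]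
    rw [lemB (c :: r) (by simp)]

-- ===== VERDICT (by name: the statement is the Claim_ definition above) =====
theorem optimize_visual_transitions_spec : Claim_equal_optimize_visual_transitions := by
  intro vs _ _
  unfold Spec_optimize_visual_transitions optimize_visual_transitions optimize_visual_transitions_alt
  match vs with
  | [] => simp [PySem.List.enumerate_nil]
  | [a] =>
    simp only [PySem.List.enumerate_cons, PySem.List.enumerate_nil, List.map_cons, List.map_nil]
    simp only [pvAStep, pvAddStart, PySem.List.len_eq]
    norm_num
  | a :: b :: t =>
    simp only [PySem.List.enumerate_cons, List.map_cons]
    rw [lemB (b :: t) (by simp)]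
    refine congrArg₂ List.cons ?_ ?_
    · simp only [pvAStep, pvAddStart, pvTransOut, PySem.List.len_eq]
      have hlen : (0:Int) ≤ ((t : List (List (String × String))).length : Int) := by positivity
      split_ifs <;> first | rfl | (exfalso; omega) | simp_all
    · rw [show PySem.List.len (a :: b :: t) = 1 + (((b :: t) : List (List (String × String))).length : Int) from by
        simp [PySem.List.len_eq]; ring]
      rw [show ((0:Int) + 1) = 1 from by ring]
      exact lemA (b :: t) 1 (le_refl 1) (by simp)
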